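-- pv_equiv track=rewrite | github.com/alibaba/x-deeplearning | xdl-algorithm-solution/TDM/src/python/cluster/tree_builder.py | _make_prefix_code
-- ===== SOURCE A (Python) =====
-- def _make_prefix_code(code):
--     prefix = ''
--     while code > 0:
--         if code % 2 == 0:
--             prefix += '1'
--         else:
--             prefix += '0'
--         code = int((code - 1) / 2)
--     prefix += '0'
--     return prefix[::-1]
-- ===== SOURCE B (Python) =====
-- def _make_prefix_code(code):
--     # Closed form: node `code` in the 0-indexed complete binary tree has heap
--     # index code+1, whose binary digits after the leading 1 are exactly the
--     # root-to-node turns; prepend '0' for the root.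
--     if code <= 0:
--         return '0'
--     return '0' + format(code + 1, 'b')[1:]
-- ===== Notes on version B (the rewrite author's own statement) =====
-- stated objective: alternative
-- what changed: Replaces the parent-chain while-loop with accumulator and final [::-1] reversal by a closed form: the answer is '0' followed by the binary digits of code+1 after the leading bit (heap-index/binary correspondence), computed with format(code+1,'b').
import Mathlib
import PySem

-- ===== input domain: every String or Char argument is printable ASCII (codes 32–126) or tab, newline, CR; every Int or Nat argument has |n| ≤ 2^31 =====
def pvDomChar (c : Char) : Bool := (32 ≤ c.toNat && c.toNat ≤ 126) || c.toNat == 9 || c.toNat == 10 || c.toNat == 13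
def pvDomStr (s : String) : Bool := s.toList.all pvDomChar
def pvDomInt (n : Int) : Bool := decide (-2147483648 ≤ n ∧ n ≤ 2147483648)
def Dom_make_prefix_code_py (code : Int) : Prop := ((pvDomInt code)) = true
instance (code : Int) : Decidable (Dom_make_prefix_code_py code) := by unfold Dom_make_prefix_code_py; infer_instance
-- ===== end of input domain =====

-- B replaces A's parent-chain while-loop + accumulator + [::-1] reversal by the closed
-- form '0' ++ (binary digits of code+1 after the leading bit) (alternative algorithm).


-- ===== PORT A =====
-- A's while-loop; `int((code - 1) / 2)` truncates toward zero = Int.tdiv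
-- (exact here: |code| ≤ 2^31 < 2^53, so the float division is exact);
-- `%` with positive divisor is PySem.Int.mod.
def pvLoopA (code : Int) (pfx : String) : String :=
  if code > 0 then
    pvLoopA ((code - 1).tdiv 2) (pfx ++ (if PySem.Int.mod code 2 == 0 then "1" else "0"))
  else pfx
termination_by code.toNat
decreasing_by
  have h2 : (code - 1).tdiv 2 = (code - 1) / 2 := Int.tdiv_eq_ediv_of_nonneg (by omega)
  omega

def make_prefix_code_py (code : Int) : String :=
  -- prefix[::-1] is exactly string reversal
  String.ofList ((pvLoopA code "" ++ "0").toList.reverse)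

-- ===== PORT B =====
-- format(n, 'b') for n ≥ 1: the binary digits of n, most significant first
def pvBinDigits (n : Nat) : List Char :=
  if n = 0 then []
  else pvBinDigits (n / 2) ++ [if n % 2 = 1 then '1' else '0']
decreasing_by exact Nat.div_lt_self (by omega) (by omega)

def make_prefix_code_py_alt (code : Int) : String :=
  if code ≤ 0 then "0"
  else String.ofList ('0' :: (pvBinDigits (code + 1).toNat).drop 1)

-- ===== PRECONDITION & SPEC =====
def Spec_make_prefix_code_py (code : Int) (out : String) : Prop := out = make_prefix_code_py_alt code
instance (code : Int) (out : String) : Decidable (Spec_make_prefix_code_py code out) := by unfold Spec_make_prefix_code_py; infer_instance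

-- ===== CLAIM (what is proved, stated in full; the proofs are below) =====
def Claim_equal_make_prefix_code_py : Prop := ∀ (code : Int), Dom_make_prefix_code_py code → Spec_make_prefix_code_py code (make_prefix_code_py code)

-- ===== LEMMAS AND PROOFS =====

theorem pvBinDigits_ne_nil (n : Nat) (h : n ≠ 0) : pvBinDigits n ≠ [] := by
  rw [pvBinDigits]
  simp [h]

-- A's accumulator can be hoisted out of the loop
theorem pvLoopA_toList (code : Int) (p : String) :
    (pvLoopA code p).toList = p.toList ++ (pvLoopA code "").toList := by
  by_cases h : code > 0
  · conv_lhs => rw [pvLoopA]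
    conv_rhs => rw [pvLoopA]
    simp only [if_pos h]
    rw [pvLoopA_toList ((code - 1).tdiv 2) (p ++ _),
        pvLoopA_toList ((code - 1).tdiv 2) ("" ++ _)]
    simp
  · conv_lhs => rw [pvLoopA]
    conv_rhs => rw [pvLoopA]
    simp [h]
termination_by code.toNat
decreasing_by
  all_goals
    have h2 : (code - 1).tdiv 2 = (code - 1) / 2 := Int.tdiv_eq_ediv_of_nonneg (by omega)
    omega

-- key correspondence: the reversed bit list of A's loop = binary digits of code+1 after the leading bit
theorem pvKey (code : Int) (h0 : 0 ≤ code) :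
    (pvLoopA code "").toList.reverse = (pvBinDigits (code + 1).toNat).drop 1 := by
  by_cases h : code > 0
  · have hp : (code - 1).tdiv 2 = (code - 1) / 2 := Int.tdiv_eq_ediv_of_nonneg (by omega)
    have ih := pvKey ((code - 1).tdiv 2) (by omega)
    conv_lhs => rw [pvLoopA]
    simp only [if_pos h]
    rw [pvLoopA_toList]
    conv_rhs => rw [pvBinDigits]
    have hne : (code + 1).toNat ≠ 0 := by omega
    have hdiv : (code + 1).toNat / 2 = (((code - 1).tdiv 2) + 1).toNat := by rw [hp]; omega
    have hmodeq : ((code + 1).toNat % 2 = 1) ↔ (PySem.Int.mod code 2 == 0) = true := by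
      rw [PySem.Int.mod_eq_emod_of_pos (by omega : (0:Int) < 2)]
      simp only [beq_iff_eq]
      omega
    have hsub : pvBinDigits ((code + 1).toNat / 2) ≠ [] := by
      apply pvBinDigits_ne_nil; omega
    simp only [if_neg hne]
    rw [List.drop_append_of_le_length (by
      rcases List.exists_cons_of_ne_nil hsub with ⟨a, l, hl⟩
      simp [hl])]
    rw [← hdiv] at ih
    simp only [List.reverse_append]
    by_cases hb : (PySem.Int.mod code 2 == 0 : Bool) = true
    · simp only [hb, if_pos (hmodeq.mpr hb)]
      simp [ih]
    · have : ¬ (code + 1).toNat % 2 = 1 := fun hx => hb (hmodeq.mp hx)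
      simp only [hb, if_neg this]
      simp [ih]
  · have hc : code = 0 := by omega
    subst hc
    rw [pvLoopA]
    norm_num
    rw [pvBinDigits]
    norm_num
    rw [pvBinDigits]
    simp
termination_by code.toNat
decreasing_by omega

-- ===== VERDICT (by name: the statement is the Claim_ definition above) =====
theorem make_prefix_code_py_spec : Claim_equal_make_prefix_code_py := by
  intro code _
  unfold Spec_make_prefix_code_py make_prefix_code_py make_prefix_code_py_alt
  by_cases h : code ≤ 0
  · rw [pvLoopA]
    simp [h, if_neg (by omega : ¬ code > 0)]
  · have := pvKey code (by omega)
    simp only [if_neg h, String.toList_append, List.reverse_append]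
    rw [this]
    simp
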